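-- pv_equiv track=rewrite | github.com/kirchenewilov10/political_tweet_analysis | telmtcp/module/telmtcp/twitter.py | get_hashtag_array_in_tweets
-- ===== SOURCE A (Python) =====
-- import collections
--
-- def get_hashtag_array_in_tweets(tweets):
--     try:
--         hashtag_array = []
--         for tweet in tweets:
--             array = tweet['hashtag_array'].split('|')
--             hashtag_array += array
--
--         grouped = collections.defaultdict(list)
--         for item in hashtag_array:
--             grouped[item].append(item)
--
--         new_hashtag_array = []
--         for model, group in grouped.items():
--             new_hashtag_array.append(group[0])
--
--         return new_hashtag_array
--     except:
--         return []
-- ===== SOURCE B (Python) =====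
-- def get_hashtag_array_in_tweets(tweets):
--     try:
--         seen = set()
--         result = []
--         for tweet in tweets:
--             for tag in tweet['hashtag_array'].split('|'):
--                 if tag not in seen:
--                     seen.add(tag)
--                     result.append(tag)
--         return result
--     except:
--         return []
-- ===== Notes on version B (the rewrite author's own statement) =====
-- stated objective: simpler
-- what changed: Fuses A's three passes (flatten all tags, build a defaultdict of duplicate groups, extract each group's first element) into one pass over the tweets that keeps a seen-set and appends each tag on first sight.
import Mathlib
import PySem

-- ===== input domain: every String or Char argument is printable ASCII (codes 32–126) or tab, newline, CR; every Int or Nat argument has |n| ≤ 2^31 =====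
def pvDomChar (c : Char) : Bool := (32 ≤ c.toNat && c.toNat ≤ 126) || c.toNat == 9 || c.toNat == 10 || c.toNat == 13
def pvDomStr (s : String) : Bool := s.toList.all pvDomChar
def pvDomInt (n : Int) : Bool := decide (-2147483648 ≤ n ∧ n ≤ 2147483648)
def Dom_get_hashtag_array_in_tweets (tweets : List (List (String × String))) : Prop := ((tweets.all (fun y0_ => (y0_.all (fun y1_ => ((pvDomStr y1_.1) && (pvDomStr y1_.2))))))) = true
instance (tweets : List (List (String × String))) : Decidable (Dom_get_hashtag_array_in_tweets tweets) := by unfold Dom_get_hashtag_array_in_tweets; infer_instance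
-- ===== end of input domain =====

-- B fuses A's three passes (flatten, group into a defaultdict, take each group's head) into one
-- pass with a seen-set; equal return value on every input (both return [] when a key is missing).

-- ===== PORT A =====
-- s.split('|'): split? is some for the nonempty separator "|", so the default [] is unreachable
def pySplitBar (s : String) : List String := (PySem.Str.split? s "|").getD []

-- the try-block is modelled with Option: none = an exception was raised (caught by `except: return []`)
def get_hashtag_array_in_tweets (tweets : List (List (String × String))) : List String :=
  match tweets.foldlM (fun (acc : List String) (tweet : List (String × String)) =>
      ((PySem.Dict.mk tweet).get? "hashtag_array").map
        (fun s => acc ++ pySplitBar s)) ([] : List String) with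
  | none => []           -- KeyError inside the try: return []
  | some hashtag_array =>
    let grouped := hashtag_array.foldl
      (fun d item => d.modify item [] (fun g => g ++ [item])) PySem.Dict.empty
    -- group[0]: each group is nonempty by construction, so the default "" is unreachable
    grouped.items.foldl (fun acc p => acc ++ [PySem.List.pyGetD p.2 0 ""]) []

-- ===== PORT B =====
def get_hashtag_array_in_tweets_alt (tweets : List (List (String × String))) : List String :=
  match tweets.foldlM (fun (st : PySem.Set String × List String) (tweet : List (String × String)) =>
      ((PySem.Dict.mk tweet).get? "hashtag_array").map
        (fun s => (pySplitBar s).foldl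
          (fun st tag => if st.1.contains tag then st else (st.1.add tag, st.2 ++ [tag])) st))
      ((PySem.Set.empty : PySem.Set String), ([] : List String)) with
  | none => []           -- KeyError inside the try: return []
  | some st => st.2

-- ===== PRECONDITION & SPEC =====
def Spec_get_hashtag_array_in_tweets (tweets : List (List (String × String))) (out : List String) : Prop := out = get_hashtag_array_in_tweets_alt tweets
instance (tweets : List (List (String × String))) (out : List String) : Decidable (Spec_get_hashtag_array_in_tweets tweets out) := by unfold Spec_get_hashtag_array_in_tweets; infer_instance

-- ===== CLAIM (what is proved, stated in full; the proofs are below) =====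
def Claim_equal_get_hashtag_array_in_tweets : Prop := ∀ (tweets : List (List (String × String))), Dom_get_hashtag_array_in_tweets tweets → Spec_get_hashtag_array_in_tweets tweets (get_hashtag_array_in_tweets tweets)

-- ===== LEMMAS AND PROOFS =====

-- B's seen-set and output list stay equal, and folding tags is PySem.Set.update
theorem bstep_pair (M : List String) (S : PySem.Set String) :
    M.foldl (fun st tag => if st.1.contains tag then st else (st.1.add tag, st.2 ++ [tag]))
      (S, (S : List String)) = (PySem.Set.update S M, PySem.Set.update S M) := by
  induction M generalizing S with
  | nil => rfl
  | cons t M ih =>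
    by_cases h : t ∈ S
    · simpa [PySem.Set.update, PySem.Set.add, h] using ih S
    · simpa [PySem.Set.update, PySem.Set.add, h] using ih (S ++ [t])

-- the two outer foldlM's raise together, and B's state tracks A's flattened accumulator
theorem loop_rel (tweets : List (List (String × String))) (L : List String) :
    tweets.foldlM (fun (st : PySem.Set String × List String) (tweet : List (String × String)) =>
        ((PySem.Dict.mk tweet).get? "hashtag_array").map
          (fun s => (pySplitBar s).foldl
            (fun st tag => if st.1.contains tag then st else (st.1.add tag, st.2 ++ [tag])) st))
        (PySem.Set.ofList L, (PySem.Set.ofList L : List String))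
    = (tweets.foldlM (fun (acc : List String) (tweet : List (String × String)) =>
        ((PySem.Dict.mk tweet).get? "hashtag_array").map
          (fun s => acc ++ pySplitBar s)) L).map
        (fun L' => (PySem.Set.ofList L', (PySem.Set.ofList L' : List String))) := by
  induction tweets generalizing L with
  | nil => rfl
  | cons tw rest ih =>
    simp only [List.foldlM_cons]
    cases (PySem.Dict.mk tw).get? "hashtag_array" with
    | none => rfl
    | some s =>
      have hupd : PySem.Set.update (PySem.Set.ofList L) (pySplitBar s)
          = PySem.Set.ofList (L ++ pySplitBar s) := by
        simp [PySem.Set.update, PySem.Set.ofList, List.foldl_append]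
      simp only [Option.map_some, bstep_pair, hupd]
      exact ih (L ++ pySplitBar s)

-- the first element of the group collected for k is k itself
theorem pyGetD_filter_self (HL : List String) (k : String) (h : k ∈ HL) :
    PySem.List.pyGetD (HL.filter (fun x => x == k)) 0 "" = k := by
  induction HL with
  | nil => cases h
  | cons x t ih =>
    by_cases hx : x = k
    · subst hx; simp [PySem.List.pyGetD, PySem.List.pyIdx?, PySem.List.pyGet?]
    · have : k ∈ t := by
        cases h with
        | head => exact absurd rfl hx
        | tail _ ht => exact ht
      simpa [hx] using ih this

-- A's grouped/extract passes compute the ordered dedup of the flattened tag list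
theorem a_tail_eq_dedup (HL : List String) :
    ((HL.foldl (fun d item => d.modify item [] (fun g => g ++ [item]))
        PySem.Dict.empty).items).foldl (fun acc p => acc ++ [PySem.List.pyGetD p.2 0 ""]) []
    = PySem.Set.ofList HL := by
  set grouped := HL.foldl (fun d item => d.modify item [] (fun g => g ++ [item])) PySem.Dict.empty
    with hg
  have hkeys : grouped.keys = PySem.Set.ofList HL := by
    rw [hg, PySem.Dict.keys_foldl_modify, PySem.Dict.keys_empty, PySem.Set.update_nil_left]
  have hnodup : grouped.keys.Nodup := by
    rw [hkeys]; exact PySem.Set.nodup_ofList HL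
  have hpairs : grouped = (HL.map (fun x => (x, x))).foldl
      (fun d p => d.modify p.1 [] (fun g => g ++ [p.2])) PySem.Dict.empty := by
    rw [hg, List.foldl_map]
  have hgetD : ∀ k, grouped.getD k [] = HL.filter (fun x => x == k) := by
    intro k
    rw [hpairs, PySem.Dict.getD_foldl_modify_append, PySem.Dict.getD_empty]
    simp [List.filter_map, Function.comp_def]
  rw [PySem.List.foldl_append_singleton_eq_map,
      PySem.Dict.items_eq_map_keys grouped hnodup [], List.map_map]
  have : ∀ k ∈ grouped.keys, PySem.List.pyGetD (grouped.getD k []) 0 "" = k := by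
    intro k hk
    have hkHL : k ∈ HL := by
      rw [hkeys] at hk; exact (PySem.Set.mem_ofList HL k).mp hk
    rw [hgetD k]; exact pyGetD_filter_self HL k hkHL
  calc grouped.keys.map ((fun p : String × List String => PySem.List.pyGetD p.2 0 "") ∘
          (fun k => (k, grouped.getD k [])))
      = grouped.keys.map id := List.map_congr_left (fun k hk => this k hk)
    _ = PySem.Set.ofList HL := by rw [List.map_id, hkeys]

-- ===== VERDICT (by name: the statement is the Claim_ definition above) =====
theorem get_hashtag_array_in_tweets_spec : Claim_equal_get_hashtag_array_in_tweets := by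
  intro tweets _
  unfold Spec_get_hashtag_array_in_tweets get_hashtag_array_in_tweets get_hashtag_array_in_tweets_alt
  have h := loop_rel tweets []
  rw [show (PySem.Set.ofList ([] : List String)) = PySem.Set.empty from rfl] at h
  rw [show ((PySem.Set.empty : PySem.Set String), ([] : List String))
        = ((PySem.Set.empty : PySem.Set String), (PySem.Set.empty : List String)) from rfl, h]
  cases hA : tweets.foldlM (fun (acc : List String) (tweet : List (String × String)) =>
      ((PySem.Dict.mk tweet).get? "hashtag_array").map
        (fun s => acc ++ pySplitBar s)) ([] : List String) with
  | none => simp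
  | some HL => simp [a_tail_eq_dedup HL]
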